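-- pv_equiv track=rewrite | github.com/fdeters/rock-paper-scissors | game.py | get_hierarchy
-- ===== SOURCE A (Python) =====
-- def get_hierarchy(move_list):
--     """
--     Reads a move list (list of str).
--     Returns a dictionary where keys are moves and corresponding values are the
--     moves that will win against the given key.
--     """
--     hierarchy = {}
--     for i in range(len(move_list)):
--         move = move_list[i]
--         winning_moves = []
--         moves_left_to_find = (len(move_list) - 1) // 2
--         if i < len(move_list) - 1:  # skip this if i is at the end
--             for j in range(i + 1, len(move_list)):
--                 winning_moves.append(move_list[j])
--                 moves_left_to_find -= 1
--                 if moves_left_to_find == 0: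
--                     break
--         if moves_left_to_find > 0:
--             for j in range(0, i):
--                 winning_moves.append(move_list[j])
--                 moves_left_to_find -= 1
--                 if moves_left_to_find == 0:
--                     break
--         # finally, define the dictionary entry
--         hierarchy[move] = winning_moves
--
--     return hierarchy
-- ===== SOURCE B (Python) =====
-- def get_hierarchy(move_list):
--     """
--     Reads a move list (list of str).
--     Returns a dictionary where keys are moves and corresponding values are the
--     moves that will win against the given key.
--     """
--     n = len(move_list)
--     k = (n - 1) // 2
--     return {m: (move_list[i + 1:] + move_list[:i])[:k]
--             for i, m in enumerate(move_list)}
-- ===== Notes on version B (the rewrite author's own statement) =====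
-- stated objective: simpler
-- what changed: Replaces A's two counted inner loops with break/countdown state by a single dict comprehension that slices the circular rotation move_list[i+1:]+move_list[:i] and takes its first (n-1)//2 elements.
-- intended difference: On 2-element lists with two distinct moves A's countdown quirk (the counter never hits 0 when k=(n-1)//2 is 0) makes the second move beat the first while nothing beats the second; B gives every move an empty list of winning moves, the intended value since k=0 says no move beats any other. — e.g. on get_hierarchy(["a", "b"]): A returns [("a", ["b"]), ("b", [])], B returns [("a", []), ("b", [])]
import Mathlib
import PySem

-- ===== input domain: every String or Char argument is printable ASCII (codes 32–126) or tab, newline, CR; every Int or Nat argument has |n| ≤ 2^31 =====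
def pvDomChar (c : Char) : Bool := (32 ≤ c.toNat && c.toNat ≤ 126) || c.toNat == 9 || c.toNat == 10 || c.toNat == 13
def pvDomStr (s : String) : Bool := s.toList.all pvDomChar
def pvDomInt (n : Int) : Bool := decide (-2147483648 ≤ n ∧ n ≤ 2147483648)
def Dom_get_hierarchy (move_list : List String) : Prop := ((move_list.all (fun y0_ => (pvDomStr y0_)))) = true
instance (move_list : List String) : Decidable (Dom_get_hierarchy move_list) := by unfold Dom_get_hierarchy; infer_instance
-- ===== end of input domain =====

-- B replaces A's two counted break/countdown loops by one slice-and-concatenate comprehension (simpler);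
-- on 2-element lists with distinct moves A's countdown quirk makes the second move beat the first; B intends no winners there (see D_).


-- ===== PORT A =====
-- A's inner 'for j in range(…): winning_moves.append(move_list[j]); moves_left_to_find -= 1; if … == 0: break'
-- loops, iterated over the same elements in the same order with the same (winning_moves, counter) state.
def pvAppendUntil (elems : List String) (winning : List String) (cnt : Int) :
    List String × Int :=
  match elems with
  | [] => (winning, cnt)
  | x :: xs =>
    let w := winning ++ [x]
    let c := cnt - 1
    if c = 0 then (w, c) else pvAppendUntil xs w c

def get_hierarchy (move_list : List String) : List (String × List String) :=
  ((List.range move_list.length).foldl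
    (fun (h : PySem.Dict String (List String)) i =>
      let move := move_list.getD i ""
      let k : Int := PySem.Int.floordiv ((move_list.length : Int) - 1) 2
      let p1 := if i + 1 < move_list.length then
                  pvAppendUntil (move_list.drop (i + 1)) [] k
                else (([] : List String), k)
      let p2 := if p1.2 > 0 then pvAppendUntil (move_list.take i) p1.1 p1.2 else p1
      h.insert move p2.1)
    PySem.Dict.empty).items

-- ===== PORT B =====
def get_hierarchy_alt (move_list : List String) : List (String × List String) :=
  let k : Int := PySem.Int.floordiv ((move_list.length : Int) - 1) 2
  ((PySem.List.enumerate move_list).foldl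
    (fun (h : PySem.Dict String (List String)) p =>
      h.insert p.2
        (PySem.List.slice
          (PySem.List.slice move_list (some (p.1 + 1)) none ++
           PySem.List.slice move_list none (some p.1)) none (some k)))
    PySem.Dict.empty).items

-- ===== PRECONDITION & SPEC =====
-- On 2-element lists with two distinct moves A's countdown never hits 0 (k=(n-1)//2 is 0), so its
-- first inner loop appends everything and the second move beats the first while nothing beats the
-- second; B gives every move an empty winning list, the intended value since k=0 says no move
-- beats any other.
def D_get_hierarchy (move_list : List String) : Prop :=
  move_list.length = 2 ∧ move_list.getD 0 "" ≠ move_list.getD 1 ""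
instance (move_list : List String) : Decidable (D_get_hierarchy move_list) := by
  unfold D_get_hierarchy; infer_instance

def Spec_get_hierarchy (move_list : List String) (out : List (String × List String)) : Prop :=
  ¬ D_get_hierarchy move_list → out = get_hierarchy_alt move_list
instance (move_list : List String) (out : List (String × List String)) :
    Decidable (Spec_get_hierarchy move_list out) := by unfold Spec_get_hierarchy; infer_instance

def pvDiffWitness_get_hierarchy : List String := ["a", "b"]
def pvDiffWitnessOut_get_hierarchy :
    (List (String × List String)) × (List (String × List String)) :=
  ([("a", ["b"]), ("b", [])], [("a", []), ("b", [])])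

-- ===== CLAIM (what is proved, stated in full; the proofs are below) =====
def Claim_unchanged_get_hierarchy : Prop := ∀ (move_list : List String), Dom_get_hierarchy move_list → Spec_get_hierarchy move_list (get_hierarchy move_list)
def Claim_changed_get_hierarchy : Prop := Dom_get_hierarchy (pvDiffWitness_get_hierarchy) ∧ D_get_hierarchy (pvDiffWitness_get_hierarchy) ∧ get_hierarchy (pvDiffWitness_get_hierarchy) = pvDiffWitnessOut_get_hierarchy.1 ∧ get_hierarchy_alt (pvDiffWitness_get_hierarchy) = pvDiffWitnessOut_get_hierarchy.2 ∧ pvDiffWitnessOut_get_hierarchy.1 ≠ pvDiffWitnessOut_get_hierarchy.2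
def Claim_exact_get_hierarchy : Prop := ∀ (move_list : List String), Dom_get_hierarchy move_list → D_get_hierarchy move_list → get_hierarchy move_list ≠ get_hierarchy_alt move_list

-- ===== LEMMAS AND PROOFS =====

lemma pvAppendUntil_le (seg : List String) (w : List String) (c : Nat)
    (h1 : 1 ≤ c) (h2 : c ≤ seg.length) :
    pvAppendUntil seg w (c : Int) = (w ++ seg.take c, 0) := by
  induction seg generalizing w c with
  | nil => simp at h2; omega
  | cons x xs ih =>
    simp only [List.length_cons] at h2
    by_cases hc1 : c = 1
    · subst hc1; simp [pvAppendUntil]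
    · have hcast : (c : Int) - 1 = ((c - 1 : Nat) : Int) := by omega
      have hne : ¬ ((c : Int) - 1 = 0) := by omega
      simp only [pvAppendUntil]
      rw [if_neg hne, hcast, ih (w ++ [x]) (c - 1) (by omega) (by omega)]
      rw [show c = (c - 1) + 1 by omega, List.take_succ_cons]
      simp

lemma pvAppendUntil_gt (seg : List String) (w : List String) (c : Nat)
    (h : seg.length < c) :
    pvAppendUntil seg w (c : Int) = (w ++ seg, (c : Int) - seg.length) := by
  induction seg generalizing w c with
  | nil => simp [pvAppendUntil]
  | cons x xs ih =>
    simp only [List.length_cons] at h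
    have hcast : (c : Int) - 1 = ((c - 1 : Nat) : Int) := by omega
    have hne : ¬ ((c : Int) - 1 = 0) := by omega
    simp only [pvAppendUntil]
    rw [if_neg hne, hcast, ih (w ++ [x]) (c - 1) (by omega)]
    simp only [List.length_cons, List.append_assoc, List.singleton_append, Prod.mk.injEq,
      true_and]
    omega

lemma pv_k_cast (l : List String) (h : 1 ≤ l.length) :
    PySem.Int.floordiv ((l.length : Int) - 1) 2 = (((l.length - 1) / 2 : Nat) : Int) := by
  have h1 : ((l.length : Int) - 1) = ((l.length - 1 : Nat) : Int) := by omega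
  rw [h1]
  exact_mod_cast PySem.Int.floordiv_natCast (l.length - 1) 2

-- B's per-index value, as a drop/take expression
lemma pv_valB (l : List String) (j : Nat) (hj : j < l.length) :
    PySem.List.slice
      (PySem.List.slice l (some ((j : Int) + 1)) none ++
       PySem.List.slice l none (some (j : Int))) none
      (some (PySem.Int.floordiv ((l.length : Int) - 1) 2)) =
    (l.drop (j + 1) ++ l.take j).take ((l.length - 1) / 2) := by
  have h1 : ((j : Int) + 1) = ((j + 1 : Nat) : Int) := by push_cast; ring
  rw [h1, PySem.List.slice_from_natCast, PySem.List.slice_to_natCast,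
      pv_k_cast l (by omega), PySem.List.slice_to _ (by positivity)]
  simp only [Int.toNat_natCast]

-- A's per-index value equals the same drop/take expression, for all lists of length ≠ 2
lemma pv_valA (l : List String) (j : Nat) (hj : j < l.length) (hn : l.length ≠ 2) :
    (let k : Int := PySem.Int.floordiv ((l.length : Int) - 1) 2
     let p1 := if j + 1 < l.length then
                 pvAppendUntil (l.drop (j + 1)) [] k
               else (([] : List String), k)
     let p2 := if p1.2 > 0 then pvAppendUntil (l.take j) p1.1 p1.2 else p1
     p2.1) =
    (l.drop (j + 1) ++ l.take j).take ((l.length - 1) / 2) := by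
  have hlen1 : 1 ≤ l.length := by omega
  rw [pv_k_cast l hlen1]
  set n := l.length with hn'
  set kn := (n - 1) / 2 with hk
  have hkle : kn ≤ n - 1 := Nat.div_le_self _ _
  by_cases hcase : j + 1 < n
  · -- inner first loop runs; kn ≥ 1 because n ≥ 3 here (n = 2 excluded)
    have hkn1 : 1 ≤ kn := by
      have : 3 ≤ n := by omega
      omega
    have hs : (l.drop (j + 1)).length = n - (j + 1) := by simp [hn']
    by_cases hsk : kn ≤ n - (j + 1)
    · simp only [hcase, if_true]
      rw [pvAppendUntil_le _ _ kn hkn1 (by omega)]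
      simp only [gt_iff_lt, lt_self_iff_false, if_false]
      rw [List.take_append, hs, show kn - (n - (j + 1)) = 0 from by omega]
      simp
    · simp only [hcase, if_true]
      rw [pvAppendUntil_gt _ _ kn (by omega)]
      have hpos : (0 : Int) < (kn : Int) - (l.drop (j + 1)).length := by
        rw [hs]; omega
      simp only [gt_iff_lt, hpos, if_true]
      have hc2 : (kn : Int) - (l.drop (j + 1)).length = ((kn - (n - (j + 1)) : Nat) : Int) := by
        rw [hs]; omega
      rw [hc2, pvAppendUntil_le _ _ _ (by omega) (by rw [List.length_take]; omega)]
      rw [List.take_append, hs,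
          List.take_of_length_le (show (l.drop (j + 1)).length ≤ kn by rw [hs]; omega)]
      simp
  · -- j is the last index: only the wrap-around loop can run
    have hj1 : j + 1 = n := by omega
    have hdrop : l.drop (j + 1) = [] := by
      apply List.drop_eq_nil_of_le; omega
    simp only [hcase, if_false]
    by_cases hk0 : kn = 0
    · simp [hk0, hdrop]
    · have hkpos : (0 : Int) < (kn : Int) := by omega
      simp only [gt_iff_lt, hkpos, if_true]
      rw [pvAppendUntil_le _ _ kn (by omega) (by simp; omega)]
      rw [hdrop]
      simp [List.take_take]

theorem pv_main (l : List String) (hn : l.length ≠ 2) :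
    get_hierarchy l = get_hierarchy_alt l := by
  unfold get_hierarchy get_hierarchy_alt
  simp only [PySem.List.enumerate_eq_map_pyRange (d := ""), List.foldl_map, PySem.List.len_eq,
             PySem.List.pyRange_zero_natCast, PySem.List.pyGetD_natCast]
  congr 1
  apply PySem.List.foldl_congr_mem
  intro acc j hjmem
  have hj : j < l.length := List.mem_range.mp hjmem
  rw [pv_valB l j hj, pv_valA l j hj hn]

-- the two-equal-moves list: A and B build the same one-entry dict
theorem pv_two_eq (a : String) :
    get_hierarchy [a, a] = get_hierarchy_alt [a, a] := by
  simp [get_hierarchy, get_hierarchy_alt, pvAppendUntil,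
        PySem.List.enumerate, PySem.Dict.insert, PySem.Dict.empty, PySem.Dict.items,
        PySem.Int.floordiv, PySem.List.slice, List.range_succ]

-- ===== VERDICT (by name: the statement is the Claim_ definition above) =====
theorem get_hierarchy_spec : Claim_unchanged_get_hierarchy := by
  intro l _ hD
  by_cases hn : l.length = 2
  · match l, hn with
    | [a, b], _ =>
      have hab : a = b := by
        by_contra hne
        exact hD ⟨rfl, by simpa using hne⟩
      subst hab
      exact pv_two_eq a
  · exact pv_main l hn

theorem get_hierarchy_changed : Claim_changed_get_hierarchy := by
  unfold Claim_changed_get_hierarchy; decide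

theorem get_hierarchy_tight : Claim_exact_get_hierarchy := by
  intro l _ hD
  obtain ⟨hlen, hne⟩ := hD
  match l, hlen with
  | [a, b], _ =>
    have hne' : a ≠ b := by simpa using hne
    have hba : (b == a) = false := by simp [BEq.symm_false, hne'.symm]
    simp [get_hierarchy, get_hierarchy_alt, pvAppendUntil,
          PySem.List.enumerate, PySem.Dict.insert, PySem.Dict.empty, PySem.Dict.items,
          PySem.Int.floordiv, PySem.List.slice, List.range_succ, hba, hne']
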